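-- pv_equiv track=rewrite | github.com/adii55689/Scan-Utility | UI Fix Utility update/NewUiFix.py | _first_unquoted_marker_index
-- ===== SOURCE A (Python) =====
-- def _first_unquoted_marker_index(line, markers):
--     """
--     Return (idx, marker) of the earliest marker in 'line' that is NOT inside a single/double-quoted string.
--     If none found, return (-1, None).
--     """
--     earliest = -1
--     earliest_marker = None
--     n = len(line)
--     i = 0
--     in_squote = False
--     in_dquote = False
--     escape = False
--     markers_sorted = sorted(markers, key=lambda m: -len(m))
--
--     while i < n:
--         ch = line[i]
--         if escape:
--             escape = False
--             i += 1
--             continue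
--         if ch == "\\":
--             escape = True
--             i += 1
--             continue
--         if not in_dquote and ch == "'" and not in_squote:
--             in_squote = True
--             i += 1
--             continue
--         elif in_squote and ch == "'" and not escape:
--             in_squote = False
--             i += 1
--             continue
--         if not in_squote and ch == '"' and not in_dquote:
--             in_dquote = True
--             i += 1
--             continue
--         elif in_dquote and ch == '"' and not escape:
--             in_dquote = False
--             i += 1
--             continue
--
--         if not in_squote and not in_dquote:
--             for m in markers_sorted:
--                 L = len(m)
--                 if i + L <= n and line[i:i+L] == m:
--                     return i, m
--         i += 1
--     return -1, None
-- ===== SOURCE B (Python) =====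
-- def _first_unquoted_marker_index(line, markers):
--     """Two-pass rewrite: first pass records which indices are unquoted start
--     positions, second pass scans those indices for the longest-first marker."""
--     n = len(line)
--     unquoted = [False] * n
--     sq = dq = esc = False
--     for i, ch in enumerate(line):
--         if esc:
--             esc = False
--         elif ch == "\\":
--             esc = True
--         elif not dq and ch == "'" and not sq:
--             sq = True
--         elif sq and ch == "'":
--             sq = False
--         elif not sq and ch == '"' and not dq:
--             dq = True
--         elif dq and ch == '"':
--             dq = False
--         else:
--             unquoted[i] = not sq and not dq
--     ms = sorted(markers, key=lambda m: -len(m))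
--     for i in range(n):
--         if unquoted[i]:
--             for m in ms:
--                 if line.startswith(m, i):
--                     return i, m
--     return -1, None
-- ===== Notes on version B (the rewrite author's own statement) =====
-- stated objective: alternative
-- what changed: Replaces A's single fused while-loop (state machine interleaved with marker matching and early return) by two separate passes: one pass over the line computing a boolean array of unquoted start positions, then a scan of those positions matching markers via str.startswith instead of slice comparison.
import Mathlib
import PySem

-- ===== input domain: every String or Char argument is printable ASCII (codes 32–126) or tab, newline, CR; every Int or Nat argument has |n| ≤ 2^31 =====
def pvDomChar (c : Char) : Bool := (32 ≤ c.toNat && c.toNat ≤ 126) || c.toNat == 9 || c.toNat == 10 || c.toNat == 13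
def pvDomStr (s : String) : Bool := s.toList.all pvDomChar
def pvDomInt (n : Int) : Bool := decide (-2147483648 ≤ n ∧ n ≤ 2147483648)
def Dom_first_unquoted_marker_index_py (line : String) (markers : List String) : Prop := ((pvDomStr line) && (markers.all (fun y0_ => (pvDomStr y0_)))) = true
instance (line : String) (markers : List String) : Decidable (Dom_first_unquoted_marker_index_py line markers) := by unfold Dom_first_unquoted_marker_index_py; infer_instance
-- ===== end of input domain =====

-- B is a two-pass rewrite of A's single fused state-machine loop: pass 1 records which
-- indices are unquoted start positions, pass 2 scans them for the first marker match
-- (objective: alternative decomposition, same cost; return value only, no mutation).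

-- ===== PORT A =====
-- inner `for m in markers_sorted: if i+L <= n and line[i:i+L] == m: return i, m`
def pvAFind (cs : List Char) (n i : Nat) : List String → Option String
  | [] => none
  | m :: rest =>
    if i + m.toList.length ≤ n ∧
        PySem.List.slice cs (some (i : Int)) (some ((i : Int) + (m.toList.length : Int))) = m.toList
    then some m
    else pvAFind cs n i rest

-- the `while i < n` loop: recursion over the remaining suffix, carrying i and the state flags
def pvALoop (cs : List Char) (n : Nat) (ms : List String) :
    List Char → Nat → Bool → Bool → Bool → Int × Option String
  | [], _, _, _, _ => (-1, none)
  | ch :: rest, i, sq, dq, esc =>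
    if esc then pvALoop cs n ms rest (i+1) sq dq false
    else if ch == '\\' then pvALoop cs n ms rest (i+1) sq dq true
    else if !dq && (ch == '\'') && !sq then pvALoop cs n ms rest (i+1) true dq esc
    else if sq && (ch == '\'') && !esc then pvALoop cs n ms rest (i+1) false dq esc
    else if !sq && (ch == '"') && !dq then pvALoop cs n ms rest (i+1) sq true esc
    else if dq && (ch == '"') && !esc then pvALoop cs n ms rest (i+1) sq false esc
    else if !sq && !dq then
      match pvAFind cs n i ms with
      | some m => ((i : Int), some m)
      | none => pvALoop cs n ms rest (i+1) sq dq esc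
    else pvALoop cs n ms rest (i+1) sq dq esc

def first_unquoted_marker_index_py (line : String) (markers : List String) : Int × Option String :=
  pvALoop line.toList line.toList.length
    (PySem.List.sorted markers (fun m => -(m.toList.length : Int)) false)
    line.toList 0 false false false

-- ===== PORT B =====
-- pass 1: the quote/escape state machine, recording per index whether it is an unquoted start
def pvBFlags : List Char → Bool → Bool → Bool → List Bool
  | [], _, _, _ => []
  | ch :: rest, sq, dq, esc =>
    if esc then false :: pvBFlags rest sq dq false
    else if ch == '\\' then false :: pvBFlags rest sq dq true
    else if !dq && (ch == '\'') && !sq then false :: pvBFlags rest true dq esc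
    else if sq && (ch == '\'') then false :: pvBFlags rest false dq esc
    else if !sq && (ch == '"') && !dq then false :: pvBFlags rest sq true esc
    else if dq && (ch == '"') then false :: pvBFlags rest sq false esc
    else (!sq && !dq) :: pvBFlags rest sq dq esc

-- `line.startswith(m, i)`: exact as prefix test on the suffix from i (0 ≤ i ≤ len(line) here)
def pvBFind (suffix : List Char) : List String → Option String
  | [] => none
  | m :: rest => if PySem.Chars.startswith suffix m.toList then some m else pvBFind suffix rest

-- pass 2: `for i in range(n): if unquoted[i]: ...`
def pvBScan (cs : List Char) (ms : List String) : Nat → List Bool → Int × Option String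
  | _, [] => (-1, none)
  | i, b :: bs =>
    if b then
      match pvBFind (cs.drop i) ms with
      | some m => ((i : Int), some m)
      | none => pvBScan cs ms (i+1) bs
    else pvBScan cs ms (i+1) bs

def first_unquoted_marker_index_py_alt (line : String) (markers : List String) : Int × Option String :=
  pvBScan line.toList
    (PySem.List.sorted markers (fun m => -(m.toList.length : Int)) false)
    0 (pvBFlags line.toList false false false)

-- ===== PRECONDITION & SPEC =====
def Spec_first_unquoted_marker_index_py (line : String) (markers : List String) (out : Int × Option String) : Prop := out = first_unquoted_marker_index_py_alt line markers
instance (line : String) (markers : List String) (out : Int × Option String) : Decidable (Spec_first_unquoted_marker_index_py line markers out) := by unfold Spec_first_unquoted_marker_index_py; infer_instance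

-- ===== CLAIM (what is proved, stated in full; the proofs are below) =====
def Claim_equal_first_unquoted_marker_index_py : Prop := ∀ (line : String) (markers : List String), Dom_first_unquoted_marker_index_py line markers → Spec_first_unquoted_marker_index_py line markers (first_unquoted_marker_index_py line markers)

-- ===== LEMMAS AND PROOFS =====

lemma pvFind_eq (cs : List Char) (i : Nat) (hi : i ≤ cs.length) :
    ∀ ms : List String, pvAFind cs cs.length i ms = pvBFind (cs.drop i) ms := by
  intro ms
  induction ms with
  | nil => rfl
  | cons m rest ih =>
    simp only [pvAFind, pvBFind]
    have hcond : (i + m.toList.length ≤ cs.length ∧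
        PySem.List.slice cs (some (i : Int)) (some ((i : Int) + (m.toList.length : Int))) = m.toList)
        ↔ PySem.Chars.startswith (cs.drop i) m.toList = true := by
      rw [PySem.List.slice_natCast_add, PySem.Chars.startswith_iff]
      constructor
      · rintro ⟨hle, heq⟩
        exact heq ▸ List.take_prefix _ _
      · intro hp
        have hlen := hp.length_le
        simp only [List.length_drop] at hlen
        refine ⟨by omega, ?_⟩
        have := List.prefix_iff_eq_take.mp hp
        exact this.symm
    by_cases h : PySem.Chars.startswith (cs.drop i) m.toList = true
    · rw [if_pos (hcond.mpr h), if_pos h]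
    · rw [if_neg (fun hc => h (hcond.mp hc)), if_neg h, ih]

lemma pvLoop_eq (cs : List Char) (ms : List String) :
    ∀ (suf : List Char) (i : Nat) (sq dq esc : Bool), i + suf.length = cs.length →
      pvALoop cs cs.length ms suf i sq dq esc = pvBScan cs ms i (pvBFlags suf sq dq esc) := by
  intro suf
  induction suf with
  | nil => intro i sq dq esc _; simp [pvALoop, pvBFlags, pvBScan]
  | cons ch rest ih =>
    intro i sq dq esc hn
    have hn' : (i + 1) + rest.length = cs.length := by simp at hn; omega
    have hi : i ≤ cs.length := by simp at hn; omega
    cases esc with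
    | true =>
      simp only [pvALoop, pvBFlags, if_true]
      rw [ih _ _ _ _ hn']
      simp [pvBScan]
    | false =>
      simp only [pvALoop, pvBFlags, Bool.not_false, Bool.and_true, if_false,
        Bool.false_eq_true]
      split_ifs with h1 h2 h3 h4 h5 h6
      · simp only [pvBScan, Bool.false_eq_true, if_false]; exact ih _ _ _ _ hn'
      · simp only [pvBScan, Bool.false_eq_true, if_false]; exact ih _ _ _ _ hn'
      · simp only [pvBScan, Bool.false_eq_true, if_false]; exact ih _ _ _ _ hn'
      · simp only [pvBScan, Bool.false_eq_true, if_false]; exact ih _ _ _ _ hn'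
      · simp only [pvBScan, Bool.false_eq_true, if_false]; exact ih _ _ _ _ hn'
      · -- the unquoted branch with the marker search
        rw [pvFind_eq cs i hi ms]
        simp only [pvBScan, h6, if_true]
        cases hf : pvBFind (cs.drop i) ms with
        | some m => simp
        | none => simp; exact ih _ _ _ _ hn'
      · simp only [pvBScan]
        rw [if_neg (by simpa using h6)]
        exact ih _ _ _ _ hn'

-- ===== VERDICT (by name: the statement is the Claim_ definition above) =====
theorem first_unquoted_marker_index_py_spec : Claim_equal_first_unquoted_marker_index_py := by
  intro line markers _
  show first_unquoted_marker_index_py line markers = first_unquoted_marker_index_py_alt line markers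
  unfold first_unquoted_marker_index_py first_unquoted_marker_index_py_alt
  exact pvLoop_eq _ _ _ 0 false false false (by simp)
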